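-- pv_equiv track=rewrite | github.com/caseSHY/AI-CLI | src/agentutils/cli.py | alpha_suffix
-- ===== SOURCE A (Python) =====
-- from typing import Any, BinaryIO, Iterable, TextIO
--
-- class AgentError(Exception):
--     def __init__(
--         self,
--         code: str,
--         message: str,
--         *,
--         path: str | None = None,
--         suggestion: str | None = None,
--         details: dict[str, Any] | None = None,
--     ) -> None:
--         super().__init__(message)
--         self.code = code
--         self.message = message
--         self.path = path
--         self.suggestion = suggestion
--         self.details = details or {}
--
--     @property
--     def exit_code(self) -> int:
--         return EXIT.get(self.code, EXIT["general_error"])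
--
--     def to_dict(self) -> dict[str, Any]:
--         error: dict[str, Any] = {"code": self.code, "message": self.message}
--         if self.path is not None:
--             error["path"] = self.path
--         if self.suggestion is not None:
--             error["suggestion"] = self.suggestion
--         if self.details:
--             error["details"] = self.details
--         return error
--
-- def alpha_suffix(index: int, width: int) -> str:
--     if width < 1:
--         raise AgentError("invalid_input", "--suffix-length must be >= 1.")
--     limit = 26**width
--     if index >= limit:
--         raise AgentError(
--             "invalid_input",
--             "Too many split chunks for the requested alphabetic suffix length.",
--             details={"index": index, "suffix_length": width},
--         )
--     chars = ["a"] * width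
--     value = index
--     for position in range(width - 1, -1, -1):
--         chars[position] = chr(ord("a") + (value % 26))
--         value //= 26
--     return "".join(chars)
-- ===== SOURCE B (Python) =====
-- def alpha_suffix(index: int, width: int) -> str:
--     if width < 1:
--         raise ValueError("--suffix-length must be >= 1.")
--     limit = 26**width
--     if not 0 <= index < limit:
--         raise ValueError("Chunk index out of range for the requested alphabetic suffix length.")
--
--     def render(value: int, w: int) -> str:
--         # value is in [0, 26**w); emit exactly w letters, divide and conquer
--         if value == 0:
--             return "a" * w
--         if w == 1:
--             return chr(ord("a") + value)
--         half = w // 2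
--         hi, lo = divmod(value, 26**half)
--         return render(hi, w - half) + render(lo, half)
--
--     return render(index, width)
-- ===== Notes on version B (the rewrite author's own statement) =====
-- stated objective: alternative
-- what changed: B renders the suffix by divide and conquer -- split the value with divmod at 26**(width//2), recurse on the two halves, and short-circuit a zero block to a run of 'a' -- instead of A's position-by-position loop threading a running quotient through a preallocated mutable char list; Pre_ excludes the inputs where A raises (width < 1 or index >= 26**width) and negative index, where A's complement-wrapped suffix is an artefact of Python floor division and B raises.
-- outside the precondition, e.g. on alpha_suffix(-1, 3): A returns 'zzz', B raises ValueError; on alpha_suffix(-27, 4): A returns 'zzyz', B raises ValueError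
import Mathlib
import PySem

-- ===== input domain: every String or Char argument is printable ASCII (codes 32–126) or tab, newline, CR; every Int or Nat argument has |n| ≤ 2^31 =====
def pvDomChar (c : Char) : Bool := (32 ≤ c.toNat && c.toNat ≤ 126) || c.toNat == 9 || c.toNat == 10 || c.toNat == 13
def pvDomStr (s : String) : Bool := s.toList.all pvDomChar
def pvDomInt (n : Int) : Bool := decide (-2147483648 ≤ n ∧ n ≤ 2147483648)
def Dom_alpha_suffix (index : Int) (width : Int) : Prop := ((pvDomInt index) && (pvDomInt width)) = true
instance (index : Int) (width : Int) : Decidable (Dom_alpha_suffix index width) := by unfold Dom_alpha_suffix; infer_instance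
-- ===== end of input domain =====

-- B renders the suffix by divide and conquer (split the value at 26^(width/2), recurse on the two
-- halves, short-circuit blocks of value 0 to runs of 'a') instead of A's position-by-position loop
-- threading a running quotient through a mutable char list (objective: alternative).
-- B also rejects negative chunk indices, which Pre_ excludes (see Pre_).

-- ===== PORT A =====
-- literal port of A: guards return "" exactly where the Python raises AgentError (excluded by Pre_).
-- Python's list with O(1) item assignment is ported as Array Char (chars[position] = … → setIfInBounds).
def alpha_suffix (index : Int) (width : Int) : String :=
  if width < 1 then "" else
  let limit : Int := (26 : Int) ^ width.toNat
  if index ≥ limit then "" else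
  let r := (PySem.List.pyRange (width - 1) (-1) (-1)).foldl
    (fun (st : Array Char × Int) pos =>
      (st.1.setIfInBounds pos.toNat (Char.ofNat (97 + (PySem.Int.mod st.2 26).toNat)),
       PySem.Int.floordiv st.2 26))
    (Array.replicate width.toNat 'a', index)
  String.ofList r.1.toList

-- ===== PORT B =====
-- render(value, w) of Source B; Python strings built by concatenation are ported as List Char.
-- The 'w ≤ 1' test is Python's 'w == 1' made total (render is never called with w = 0).
def renderB (value : Int) (w : Nat) : List Char :=
  if value = 0 then List.replicate w 'a'
  else if h1 : w ≤ 1 then [Char.ofNat (97 + value.toNat)]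
  else
    -- half = w // 2, inlined
    renderB (PySem.Int.floordiv value ((26 : Int) ^ (w / 2))) (w - w / 2) ++
    renderB (PySem.Int.mod value ((26 : Int) ^ (w / 2))) (w / 2)
termination_by w
decreasing_by all_goals omega

def alpha_suffix_alt (index : Int) (width : Int) : String :=
  if width < 1 then "" else
  let limit : Int := (26 : Int) ^ width.toNat
  if ¬ (0 ≤ index ∧ index < limit) then "" else
  String.ofList (renderB index width.toNat)

-- ===== PRECONDITION & SPEC =====
-- Pre_ excludes (i) the inputs where the Python A raises AgentError (width < 1, or index ≥ 26**width —
-- the bound is stated through Nat.log so it is cheap to decide even for huge width), and (ii) negative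
-- index, where A's complement-wrapped all-letters suffix is an artefact of Python floor division on a
-- chunk counter that is never negative, and B raises.
def Pre_alpha_suffix (index : Int) (width : Int) : Prop :=
  1 ≤ width ∧ 0 ≤ index ∧ (index = 0 ∨ Nat.log 26 index.toNat < width.toNat)
instance (index : Int) (width : Int) : Decidable (Pre_alpha_suffix index width) := by
  unfold Pre_alpha_suffix; infer_instance
def pvWitness_alpha_suffix : Int × Int := (27, 3)

def Spec_alpha_suffix (index : Int) (width : Int) (out : String) : Prop := out = alpha_suffix_alt index width
instance (index : Int) (width : Int) (out : String) : Decidable (Spec_alpha_suffix index width out) := by unfold Spec_alpha_suffix; infer_instance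

-- ===== CLAIM =====
def Claim_equal_alpha_suffix : Prop := ∀ (index : Int) (width : Int), Dom_alpha_suffix index width → Pre_alpha_suffix index width → Spec_alpha_suffix index width (alpha_suffix index width)

-- ===== LEMMAS AND PROOFS =====

-- setting position cs.length in cs ++ [a] replaces that last element
theorem set_snoc {α : Type} (cs : List α) (a c : α) :
    (cs ++ [a]).set cs.length c = cs ++ [c] := by
  induction cs with
  | nil => rfl
  | cons x xs ih => simp [ih]

-- the Array fold of port A computes the List fold on toList
theorem foldA_bridge (l : List Int) (a : Array Char) (v : Int) :
    (((l.foldl (fun (st : Array Char × Int) pos =>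
        (st.1.setIfInBounds pos.toNat (Char.ofNat (97 + (PySem.Int.mod st.2 26).toNat)),
         PySem.Int.floordiv st.2 26)) (a, v))).1.toList,
     ((l.foldl (fun (st : Array Char × Int) pos =>
        (st.1.setIfInBounds pos.toNat (Char.ofNat (97 + (PySem.Int.mod st.2 26).toNat)),
         PySem.Int.floordiv st.2 26)) (a, v))).2)
    = l.foldl (fun (st : List Char × Int) pos =>
        (st.1.set pos.toNat (Char.ofNat (97 + (PySem.Int.mod st.2 26).toNat)),
         PySem.Int.floordiv st.2 26)) (a.toList, v) := by
  induction l generalizing a v with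
  | nil => rfl
  | cons x xs ih =>
    simp only [List.foldl_cons]
    rw [ih, Array.toList_setIfInBounds]

-- a fold whose sets all hit indices below cs.length leaves a tail untouched
theorem fold_tail (l : List Int) (cs t : List Char) (v : Int)
    (h : ∀ x ∈ l, 0 ≤ x ∧ x < (cs.length : Int)) :
    l.foldl (fun (st : List Char × Int) pos =>
        (st.1.set pos.toNat (Char.ofNat (97 + (PySem.Int.mod st.2 26).toNat)),
         PySem.Int.floordiv st.2 26)) (cs ++ t, v)
    = ((l.foldl (fun (st : List Char × Int) pos =>
        (st.1.set pos.toNat (Char.ofNat (97 + (PySem.Int.mod st.2 26).toNat)),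
         PySem.Int.floordiv st.2 26)) (cs, v)).1 ++ t,
       (l.foldl (fun (st : List Char × Int) pos =>
        (st.1.set pos.toNat (Char.ofNat (97 + (PySem.Int.mod st.2 26).toNat)),
         PySem.Int.floordiv st.2 26)) (cs, v)).2) := by
  induction l generalizing cs v with
  | nil => rfl
  | cons x xs ih =>
    obtain ⟨hx0, hxlt⟩ := h x (List.mem_cons_self ..)
    have hlt : x.toNat < cs.length := by omega
    simp only [List.foldl_cons]
    rw [List.set_append_left _ _ hlt]
    rw [ih _ _ (by simpa using fun y hy => h y (List.mem_cons_of_mem _ hy))]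

theorem floordiv_floordiv (a : Int) (n : Nat) :
    PySem.Int.floordiv (PySem.Int.floordiv a 26) ((26 : Int) ^ n)
    = PySem.Int.floordiv a ((26 : Int) ^ (n + 1)) := by
  rw [PySem.Int.floordiv_eq_ediv_of_pos (by positivity),
      PySem.Int.floordiv_eq_ediv_of_pos (by norm_num),
      PySem.Int.floordiv_eq_ediv_of_pos (by positivity)]
  rw [pow_succ', ← Int.ediv_ediv_of_nonneg (by norm_num : (0:Int) ≤ 26)]

theorem floordiv_pow_pow (a : Int) (h k : Nat) :
    PySem.Int.floordiv (PySem.Int.floordiv a ((26 : Int) ^ h)) ((26 : Int) ^ k)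
    = PySem.Int.floordiv a ((26 : Int) ^ (h + k)) := by
  rw [PySem.Int.floordiv_eq_ediv_of_pos (by positivity),
      PySem.Int.floordiv_eq_ediv_of_pos (by positivity),
      PySem.Int.floordiv_eq_ediv_of_pos (by positivity)]
  rw [pow_add, ← Int.ediv_ediv_of_nonneg (by positivity : (0:Int) ≤ (26:Int) ^ h)]

-- the whole loop of A: its char list reads each position off the original value via a power of 26
theorem loop_eq (w : Nat) (v : Int) :
    (PySem.List.pyRange ((w : Int) - 1) (-1) (-1)).foldl
      (fun (st : List Char × Int) pos =>
        (st.1.set pos.toNat (Char.ofNat (97 + (PySem.Int.mod st.2 26).toNat)),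
         PySem.Int.floordiv st.2 26))
      (List.replicate w 'a', v)
    = ((List.range w).map (fun p =>
         Char.ofNat (97 + (PySem.Int.mod (PySem.Int.floordiv v ((26 : Int) ^ (w - 1 - p))) 26).toNat)),
       PySem.Int.floordiv v ((26 : Int) ^ w)) := by
  induction w generalizing v with
  | zero =>
    rw [PySem.List.pyRange_neg_one_eq_nil (by norm_num)]
    simp
  | succ w ih =>
    have hcons : PySem.List.pyRange ((w + 1 : Nat) - 1) (-1) (-1)
        = (w : Int) :: PySem.List.pyRange ((w : Int) - 1) (-1) (-1) := by
      push_cast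
      rw [PySem.List.pyRange_neg_one_cons (by omega)]
      norm_num
    rw [hcons]
    simp only [List.foldl_cons]
    have hset : (List.replicate (w + 1) 'a').set (w : Int).toNat
        (Char.ofNat (97 + (PySem.Int.mod v 26).toNat))
        = List.replicate w 'a' ++ [Char.ofNat (97 + (PySem.Int.mod v 26).toNat)] := by
      rw [List.replicate_succ' ]
      have : (w : Int).toNat = (List.replicate w 'a').length := by simp
      rw [this, set_snoc]
    rw [hset]
    rw [fold_tail _ _ _ _ (by
      intro x hx
      rw [PySem.List.mem_pyRange_neg_one] at hx
      constructor <;> [omega; simpa using by omega])]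
    rw [ih]
    refine Prod.ext ?_ ?_
    · simp only [List.range_succ, List.map_append, List.map_cons, List.map_nil]
      congr 1
      · apply List.map_congr_left
        intro p hp
        have hp' : p < w := List.mem_range.mp hp
        have : w - 1 - p + 1 = w + 1 - 1 - p := by omega
        rw [floordiv_floordiv, this]
      · simp
    · simp only
      rw [floordiv_floordiv]

-- digit k of x depends only on x mod 26^(k+1)
theorem digit_lower (x : Int) (k : Nat) :
    x / (26 : Int) ^ k % 26 = x % (26 : Int) ^ (k + 1) / (26 : Int) ^ k := by
  have hq : (0 : Int) < (26 : Int) ^ (k + 1) := by positivity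
  have hp : (0 : Int) < (26 : Int) ^ k := by positivity
  have h1 : x = (26 : Int) ^ (k + 1) * (x / (26 : Int) ^ (k + 1)) + x % (26 : Int) ^ (k + 1) :=
    (Int.ediv_add_emod _ _).symm
  have hr0 : 0 ≤ x % (26 : Int) ^ (k + 1) := Int.emod_nonneg _ (by positivity)
  have hr1 : x % (26 : Int) ^ (k + 1) < (26 : Int) ^ (k + 1) := Int.emod_lt_of_pos _ hq
  set q := x / (26 : Int) ^ (k + 1) with hqdef
  set r := x % (26 : Int) ^ (k + 1) with hrdef
  have h2 : x = r + q * 26 * (26 : Int) ^ k := by rw [h1]; ring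
  rw [h2, Int.add_mul_ediv_right _ _ (ne_of_gt hp)]
  have h3 : (r / (26 : Int) ^ k + q * 26) % 26 = r / (26 : Int) ^ k % 26 := by
    rw [mul_comm q 26]
    exact Int.add_mul_emod_self_left ..
  rw [h3]
  have hlt : r / (26 : Int) ^ k < 26 := by
    apply Int.ediv_lt_of_lt_mul hp
    calc r < (26 : Int) ^ (k + 1) := hr1
      _ = 26 * (26 : Int) ^ k := by rw [pow_succ']
  exact Int.emod_eq_of_lt (Int.ediv_nonneg hr0 (le_of_lt hp)) hlt

-- digits below position h are unchanged by reducing mod 26^h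
theorem digit_transfer (a : Int) (h k : Nat) (hk : k < h) :
    PySem.Int.mod (PySem.Int.floordiv (PySem.Int.mod a ((26 : Int) ^ h)) ((26 : Int) ^ k)) 26
    = PySem.Int.mod (PySem.Int.floordiv a ((26 : Int) ^ k)) 26 := by
  have hh : (0 : Int) < (26 : Int) ^ h := by positivity
  have hkp : (0 : Int) < (26 : Int) ^ k := by positivity
  simp only [PySem.Int.mod_eq_emod_of_pos hh,
    PySem.Int.mod_eq_emod_of_pos (show (0:Int) < 26 by norm_num),
    PySem.Int.floordiv_eq_ediv_of_pos hkp]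
  rw [digit_lower, digit_lower a k,
    Int.emod_emod_of_dvd _ (pow_dvd_pow 26 hk)]

-- the divide-and-conquer renderer equals the per-position digit formula
theorem renderB_eq (w : Nat) (m : Int) (h0 : 0 ≤ m) (hlt : m < (26 : Int) ^ w) (hw : 1 ≤ w) :
    renderB m w = (List.range w).map (fun p =>
      Char.ofNat (97 + (PySem.Int.mod (PySem.Int.floordiv m ((26 : Int) ^ (w - 1 - p))) 26).toNat)) := by
  induction w using Nat.strong_induction_on generalizing m with
  | _ w ih =>
    rw [renderB]
    split_ifs with hz h1
    · subst hz
      refine (List.eq_replicate_iff.mpr ⟨by simp, ?_⟩).symm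
      intro b hb
      obtain ⟨p, _, rfl⟩ := List.mem_map.mp hb
      have : PySem.Int.floordiv 0 ((26 : Int) ^ (w - 1 - p)) = 0 := by
        rw [PySem.Int.floordiv_eq_ediv_of_pos (by positivity)]
        exact Int.zero_ediv _
      rw [this]
      rfl
    · -- w = 1
      have hw1 : w = 1 := by omega
      subst hw1
      have hm26 : m < 26 := by simpa using hlt
      have e1 : PySem.Int.floordiv m ((26 : Int) ^ (0 : Nat)) = m := by
        rw [PySem.Int.floordiv_eq_ediv_of_pos (by norm_num : (0:Int) < (26:Int)^(0:Nat))]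
        simp
      have e2 : PySem.Int.mod m 26 = m := by
        rw [PySem.Int.mod_eq_emod_of_pos (by norm_num)]
        exact Int.emod_eq_of_lt h0 hm26
      have e0 : (0 : Nat) - 0 = 0 := rfl
      simp only [List.range_succ, List.range_zero, List.nil_append, List.map_cons,
        List.map_nil, e0, e1, e2]
    · -- 2 ≤ w: split at half = w / 2
      have hw2 : 2 ≤ w := by omega
      have hhalf1 : 1 ≤ w / 2 := by omega
      have hrest1 : 1 ≤ w - w / 2 := by omega
      have hpowpos : (0 : Int) < (26 : Int) ^ (w / 2) := by positivity
      have hhi0 : 0 ≤ PySem.Int.floordiv m ((26 : Int) ^ (w / 2)) := by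
        rw [PySem.Int.floordiv_eq_ediv_of_pos hpowpos]
        exact Int.ediv_nonneg h0 (le_of_lt hpowpos)
      have hhilt : PySem.Int.floordiv m ((26 : Int) ^ (w / 2)) < (26 : Int) ^ (w - w / 2) := by
        rw [PySem.Int.floordiv_eq_ediv_of_pos hpowpos]
        apply Int.ediv_lt_of_lt_mul hpowpos
        calc m < (26 : Int) ^ w := hlt
          _ = (26 : Int) ^ (w - w / 2) * (26 : Int) ^ (w / 2) := by
              rw [← pow_add]; congr 1; omega
      have hlo0 : 0 ≤ PySem.Int.mod m ((26 : Int) ^ (w / 2)) := by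
        rw [PySem.Int.mod_eq_emod_of_pos hpowpos]
        exact Int.emod_nonneg _ (ne_of_gt hpowpos)
      have hlolt : PySem.Int.mod m ((26 : Int) ^ (w / 2)) < (26 : Int) ^ (w / 2) := by
        rw [PySem.Int.mod_eq_emod_of_pos hpowpos]
        exact Int.emod_lt_of_pos _ hpowpos
      rw [ih (w - w / 2) (by omega) _ hhi0 hhilt hrest1,
          ih (w / 2) (by omega) _ hlo0 hlolt hhalf1]
      have hsplit : List.range w
          = List.range (w - w / 2) ++ (List.range (w / 2)).map ((w - w / 2) + ·) := by
        rw [← List.range_add]; congr 1; omega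
      rw [hsplit, List.map_append, List.map_map]
      congr 1
      · apply List.map_congr_left
        intro p hp
        have hp' : p < w - w / 2 := List.mem_range.mp hp
        rw [floordiv_pow_pow]
        have he : w / 2 + (w - w / 2 - 1 - p) = w - 1 - p := by omega
        rw [he]
      · apply List.map_congr_left
        intro q hq
        have hq' : q < w / 2 := List.mem_range.mp hq
        simp only [Function.comp_apply]
        rw [digit_transfer _ (w / 2) _ (by omega : w / 2 - 1 - q < w / 2)]
        have he : w - 1 - (w - w / 2 + q) = w / 2 - 1 - q := by omega
        rw [he]

-- ===== VERDICT =====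
theorem alpha_suffix_spec : Claim_equal_alpha_suffix := by
  intro index width _ hpre
  unfold Spec_alpha_suffix alpha_suffix alpha_suffix_alt
  obtain ⟨hw, hi0, hlog⟩ := hpre
  have hwn : 1 ≤ width.toNat := by omega
  have hlt : index < (26 : Int) ^ width.toNat := by
    by_cases hz : index = 0
    · subst hz; positivity
    · have hne : index.toNat ≠ 0 := by omega
      have h' : Nat.log 26 index.toNat < width.toNat := hlog.resolve_left hz
      have := (Nat.log_lt_iff_lt_pow (by norm_num : 1 < 26) hne).mp h'
      calc index = (index.toNat : Int) := (Int.toNat_of_nonneg hi0).symm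
        _ < ((26 ^ width.toNat : Nat) : Int) := by exact_mod_cast this
        _ = (26 : Int) ^ width.toNat := by push_cast; ring
  have h1 : ¬ (width < 1) := by omega
  have h2 : ¬ (index ≥ (26 : Int) ^ width.toNat) := not_le.mpr hlt
  have h3 : ¬ ¬ (0 ≤ index ∧ index < (26 : Int) ^ width.toNat) := not_not_intro ⟨hi0, hlt⟩
  simp only [if_neg h1, if_neg h2, if_neg h3]
  have hcast : width - 1 = (width.toNat : Int) - 1 := by omega
  rw [hcast]
  have hbridge := foldA_bridge (PySem.List.pyRange ((width.toNat : Int) - 1) (-1) (-1))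
    (Array.replicate width.toNat 'a') index
  have harr : (Array.replicate width.toNat 'a').toList = List.replicate width.toNat 'a' := by
    simp
  rw [harr, loop_eq] at hbridge
  have hfst := congrArg Prod.fst hbridge
  simp only at hfst
  rw [hfst, renderB_eq width.toNat index hi0 hlt hwn]
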